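-- pv_equiv track=rewrite | github.com/MassilAit/BNN | find_inner_rep/find_minimum.py | substitute_hidden
-- ===== SOURCE A (Python) =====
-- from typing import List, Optional, Tuple, Any
--
-- def substitute_hidden(expr: str, hidden_exprs: List[str]) -> str:
--     """
--     Replace A, B, C, … in expr with their corresponding hidden expressions
--     inside [ ] brackets, even if they appear concatenated like 'AB'.
--     """
--     out = ""
--     for char in expr:
--         if 'A' <= char <= 'Z':
--             idx = ord(char) - ord('A')
--             if idx < len(hidden_exprs):
--                 out += f"[{hidden_exprs[idx]}]"
--             else:
--                 out += char
--         else: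
--             out += char
--     return out
-- ===== SOURCE B (Python) =====
-- def substitute_hidden(expr, hidden_exprs):
--     """
--     Replace A, B, C, ... in expr with their bracketed hidden expressions by
--     running one split-and-join pass per usable letter: each pass splits the
--     still-literal text pieces on that letter and splices in an inert
--     replacement token, so no per-character scanning or branching is done.
--     """
--     # pieces: (True, literal text still to be processed) or (False, finished token)
--     pieces = [(True, expr)]
--     for i, h in enumerate(hidden_exprs[:26]):
--         letter = chr(ord('A') + i)
--         rep = (False, f"[{h}]")
--         nxt = []
--         for is_text, s in pieces:
--             if is_text:
--                 parts = s.split(letter)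
--                 nxt.append((True, parts[0]))
--                 for part in parts[1:]:
--                     nxt.append(rep)
--                     nxt.append((True, part))
--             else:
--                 nxt.append((is_text, s))
--         pieces = nxt
--     return "".join(s for _, s in pieces)
-- ===== Notes on version B (the rewrite author's own statement) =====
-- stated objective: alternative
-- what changed: Replaces A's single per-character scan with branching and string concatenation by staged whole-string passes: one split-and-splice pass per usable letter (at most 26), each splitting the remaining literal text pieces on that letter with str.split and splicing in inert bracketed replacement tokens, then one final join.
import Mathlib
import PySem

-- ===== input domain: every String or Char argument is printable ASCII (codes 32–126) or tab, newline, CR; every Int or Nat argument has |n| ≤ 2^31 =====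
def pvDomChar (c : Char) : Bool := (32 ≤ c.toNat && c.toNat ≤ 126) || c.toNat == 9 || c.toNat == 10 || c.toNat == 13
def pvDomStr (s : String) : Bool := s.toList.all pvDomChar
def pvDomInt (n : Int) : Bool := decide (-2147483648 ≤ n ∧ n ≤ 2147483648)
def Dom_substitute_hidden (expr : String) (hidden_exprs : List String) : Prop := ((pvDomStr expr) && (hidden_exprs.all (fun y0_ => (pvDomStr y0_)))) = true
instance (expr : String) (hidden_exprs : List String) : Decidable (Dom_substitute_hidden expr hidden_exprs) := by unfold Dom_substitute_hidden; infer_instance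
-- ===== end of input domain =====

-- B replaces A's per-character scan-and-branch loop by one split-and-splice pass per
-- usable letter (staged library-level split/join passes over a piece list); return values proved equal.

-- ===== PORT A =====
-- one iteration of A's loop body: the chunk appended to `out` for the character c
def subAChar (hidden_exprs : List String) (c : Char) : List Char :=
  if 'A' ≤ c ∧ c ≤ 'Z' then
    if c.toNat - 'A'.toNat < hidden_exprs.length then
      '[' :: ((hidden_exprs.getD (c.toNat - 'A'.toNat) "").toList ++ [']'])
    else [c]
  else [c]

def substitute_hidden (expr : String) (hidden_exprs : List String) : String :=
  String.ofList (expr.toList.foldl (fun out c => out ++ subAChar hidden_exprs c) [])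

-- ===== PORT B =====
-- pieces = [(True, expr)]; for i, h in enumerate(hidden_exprs[:26]): one split-and-splice
-- pass over the pieces; finally "".join of the pieces.  (Strings are handled on the
-- List Char side throughout, where the PySem string primitives are defined.)
def substitute_hidden_alt (expr : String) (hidden_exprs : List String) : String :=
  String.ofList (PySem.Chars.join [] ((
    (PySem.List.enumerate (hidden_exprs.take 26) 0).foldl
      (fun pieces p =>
        let letter : Char := Char.ofNat (65 + p.1.toNat)          -- chr(ord('A') + i)
        let rep : List Char := '[' :: (p.2.toList ++ [']'])       -- f"[{h}]"
        pieces.foldl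
          (fun nxt q =>
            if q.1 then
              match PySem.Chars.split? q.2 [letter] with          -- s.split(letter)
              | some parts =>
                  (parts.drop 1).foldl (fun n part => n ++ [(false, rep), (true, part)])
                    (nxt ++ [(true, parts.headI)])                -- parts[0] (never empty)
              | none => nxt                                       -- unreachable: [letter] ≠ ""
            else nxt ++ [q])
          ([] : List (Bool × List Char)))
      [(true, expr.toList)]).map Prod.snd))                       -- "".join(...)

-- ===== PRECONDITION & SPEC =====
def Spec_substitute_hidden (expr : String) (hidden_exprs : List String) (out : String) : Prop := out = substitute_hidden_alt expr hidden_exprs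
instance (expr : String) (hidden_exprs : List String) (out : String) : Decidable (Spec_substitute_hidden expr hidden_exprs out) := by unfold Spec_substitute_hidden; infer_instance

-- ===== CLAIM (what is proved, stated in full; the proofs are below) =====
def Claim_equal_substitute_hidden : Prop := ∀ (expr : String) (hidden_exprs : List String), Dom_substitute_hidden expr hidden_exprs → Spec_substitute_hidden expr hidden_exprs (substitute_hidden expr hidden_exprs)

-- ===== LEMMAS AND PROOFS =====

-- (first part, later parts) of s.split(L) for a single-character separator
def spChar (L : Char) : List Char → List Char × List (List Char)
  | [] => ([], [])
  | c :: cs =>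
      if c = L then ([], (spChar L cs).1 :: (spChar L cs).2)
      else (c :: (spChar L cs).1, (spChar L cs).2)

theorem go_single (L : Char) : ∀ (l : List Char) (fuel : Nat) (cur : List Char)
    (acc : List (List Char)), l.length ≤ fuel →
    PySem.Chars.splitOn.go [L] fuel l cur acc
      = acc.reverse ++ ((cur.reverse ++ (spChar L l).1) :: (spChar L l).2) := by
  intro l
  induction l with
  | nil =>
    intro fuel cur acc _
    cases fuel <;> simp [PySem.Chars.splitOn.go, spChar]
  | cons c cs ih =>
    intro fuel cur acc hlen
    cases fuel with
    | zero => simp at hlen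
    | succ f =>
      have hlen' : cs.length ≤ f := by simpa using hlen
      by_cases hc : c = L
      · subst hc
        simp only [PySem.Chars.splitOn.go, List.isPrefixOf, BEq.rfl, Bool.true_and,
          if_true, List.length_cons, List.length_nil, List.drop_succ_cons, List.drop_zero]
        rw [ih f [] (cur.reverse :: acc) hlen']
        simp [spChar]
      · have hbeq : (L == c) = false := by simp; exact fun h => hc h.symm
        simp only [PySem.Chars.splitOn.go, List.isPrefixOf, hbeq, Bool.false_and]
        rw [ih f (c :: cur) acc hlen']
        simp [spChar, hc]
  
theorem splitOn_single (L : Char) (l : List Char) :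
    PySem.Chars.splitOn l [L] = (spChar L l).1 :: (spChar L l).2 := by
  unfold PySem.Chars.splitOn
  rw [go_single L l (l.length + 1) [] [] (by omega)]
  simp

-- every character of any part of the split is a non-separator character of l
theorem spChar_chars (L : Char) : ∀ (l : List Char),
    (∀ c ∈ (spChar L l).1, c ∈ l ∧ c ≠ L) ∧
    (∀ p ∈ (spChar L l).2, ∀ c ∈ p, c ∈ l ∧ c ≠ L) := by
  intro l
  induction l with
  | nil => simp [spChar]
  | cons c cs ih =>
    by_cases hc : c = L
    · subst hc
      simp only [spChar]
      refine ⟨by simp, ?_⟩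
      intro p hp x hx
      rcases List.mem_cons.mp hp with h | h
      · subst h
        exact ⟨List.mem_cons_of_mem _ (ih.1 x hx).1, (ih.1 x hx).2⟩
      · exact ⟨List.mem_cons_of_mem _ (ih.2 p h x hx).1, (ih.2 p h x hx).2⟩
    · simp only [spChar, if_neg hc]
      refine ⟨?_, ?_⟩
      · intro x hx
        rcases List.mem_cons.mp hx with h | h
        · subst h; exact ⟨List.mem_cons_self, hc⟩
        · exact ⟨List.mem_cons_of_mem _ (ih.1 x h).1, (ih.1 x h).2⟩
      · intro p hp x hx
        exact ⟨List.mem_cons_of_mem _ (ih.2 p hp x hx).1, (ih.2 p hp x hx).2⟩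

-- flatMap over l, decomposed along the split at L
theorem flatMap_spChar (L : Char) (f : Char → List Char) : ∀ (l : List Char),
    l.flatMap f
      = (spChar L l).1.flatMap f
        ++ (spChar L l).2.flatMap (fun p => f L ++ p.flatMap f) := by
  intro l
  induction l with
  | nil => simp [spChar]
  | cons c cs ih =>
    by_cases hc : c = L
    · subst hc
      simp only [spChar, List.flatMap_cons]
      rw [ih]
      simp [List.append_assoc]
    · simp only [spChar, if_neg hc, List.flatMap_cons]
      rw [ih]
      simp [List.append_assoc]

-- ''.join of char lists is concatenation
theorem join_nil_sep : ∀ (parts : List (List Char)),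
    PySem.Chars.join [] parts = parts.flatten := by
  intro parts
  induction parts with
  | nil => simp [PySem.Chars.join_nil]
  | cons p rest ih =>
    cases rest with
    | nil => simp [PySem.Chars.join_singleton]
    | cons q r =>
      rw [PySem.Chars.join_cons_cons, ih]
      simp

-- the piece list produced for one piece by one pass of B
def pieceStep (L : Char) (R : List Char) (q : Bool × List Char) : List (Bool × List Char) :=
  if q.1 then
    (true, (spChar L q.2).1) :: (spChar L q.2).2.flatMap (fun part => [(false, R), (true, part)])
  else [q]

-- one pass of B, as a flatMap
def stepFn (pieces : List (Bool × List Char)) (p : Int × String) : List (Bool × List Char) :=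
  pieces.flatMap (pieceStep (Char.ofNat (65 + p.1.toNat)) ('[' :: (p.2.toList ++ [']'])))

theorem portStep_eq :
    (fun (pieces : List (Bool × List Char)) (p : Int × String) =>
        let letter : Char := Char.ofNat (65 + p.1.toNat)
        let rep : List Char := '[' :: (p.2.toList ++ [']'])
        pieces.foldl
          (fun nxt q =>
            if q.1 then
              match PySem.Chars.split? q.2 [letter] with
              | some parts =>
                  (parts.drop 1).foldl (fun n part => n ++ [(false, rep), (true, part)])
                    (nxt ++ [(true, parts.headI)])
              | none => nxt
            else nxt ++ [q])
          ([] : List (Bool × List Char)))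
      = stepFn := by
  funext pieces p
  show pieces.foldl _ [] = _
  have hbody : (fun (nxt : List (Bool × List Char)) (q : Bool × List Char) =>
      if q.1 then
        match PySem.Chars.split? q.2 [Char.ofNat (65 + p.1.toNat)] with
        | some parts =>
            (parts.drop 1).foldl
              (fun n part => n ++ [(false, '[' :: (p.2.toList ++ [']'])), (true, part)])
              (nxt ++ [(true, parts.headI)])
        | none => nxt
      else nxt ++ [q])
      = (fun nxt q => nxt ++ pieceStep (Char.ofNat (65 + p.1.toNat)) ('[' :: (p.2.toList ++ [']'])) q) := by
    funext nxt q
    by_cases hq : q.1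
    · have hsplit : PySem.Chars.split? q.2 [Char.ofNat (65 + p.1.toNat)]
          = some ((spChar (Char.ofNat (65 + p.1.toNat)) q.2).1
              :: (spChar (Char.ofNat (65 + p.1.toNat)) q.2).2) := by
        simp [PySem.Chars.split?, splitOn_single]
      simp only [hq, if_true, hsplit, List.headI_cons, List.drop_one, List.tail_cons]
      rw [PySem.List.foldl_append_eq_flatMap]
      simp [pieceStep, hq, List.append_assoc]
    · simp [hq, pieceStep]
  rw [hbody, PySem.List.foldl_append_eq_flatMap]
  simp [stepFn]

theorem ofNat_letter_toNat (i : Nat) (_hi : i < 26) : (Char.ofNat (65 + i)).toNat = 65 + i := by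
  interval_cases i <;> decide

-- a character whose code is that of the i-th letter IS that letter
theorem char_eq_of_toNat (c : Char) (i : Nat) (_hi : i < 26) (h : c.toNat = 65 + i) :
    c = Char.ofNat (65 + i) := by
  rw [← h, Char.ofNat_toNat]

-- main invariant: running the remaining passes over pieces whose text parts contain
-- no already-processed letter yields A's per-character expansion of the text parts
theorem main_inv (hs : List String) : ∀ (rest : List String) (i : Nat),
    (hs.take 26).drop i = rest →
    ∀ (pieces : List (Bool × List Char)),
    (∀ q ∈ pieces, q.1 = true → ∀ c ∈ q.2, c.toNat < 65 ∨ 65 + i ≤ c.toNat) →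
    ((PySem.List.enumerate rest (i : Int)).foldl stepFn pieces).flatMap Prod.snd
      = pieces.flatMap (fun q => if q.1 then q.2.flatMap (subAChar hs) else q.2) := by
  intro rest
  induction rest with
  | nil =>
    intro i hdrop pieces hInv
    have hm : min 26 hs.length ≤ i := by
      have := List.drop_eq_nil_iff.mp hdrop
      simpa using this
    simp only [PySem.List.enumerate, List.foldl_nil]
    refine List.flatMap_congr ?_
    intro q hq
    by_cases hq1 : q.1
    · rw [if_pos hq1]
      have : ∀ c ∈ q.2, subAChar hs c = [c] := by
        intro c hc
        have hrange := hInv q hq hq1 c hc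
        unfold subAChar
        split_ifs with h1 h2
        · exfalso
          have hle : 65 ≤ c.toNat ∧ c.toNat ≤ 90 := ⟨h1.1, h1.2⟩
          have h65 : 'A'.toNat = 65 := rfl
          rw [h65] at h2
          omega
        · rfl
        · rfl
      rw [List.flatMap_congr this, List.flatMap_singleton']
    · rw [if_neg hq1]
  | cons h rest' ih =>
    intro i hdrop pieces hInv
    have hlt : i < (hs.take 26).length := by
      by_contra hge
      rw [List.drop_eq_nil_iff.mpr (by omega)] at hdrop
      simp at hdrop
    have hi26 : i < 26 := by simp at hlt; omega
    have hiLen : i < hs.length := by simp at hlt; omega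
    have hget : hs[i]? = some h := by
      have h0 : ((hs.take 26).drop i)[0]? = some h := by rw [hdrop]; rfl
      rw [List.getElem?_drop] at h0
      rw [← List.getElem?_take_of_lt (l := hs) (j := 26) hi26]
      simpa using h0
    have hgetd : hs.getD i "" = h := by
      rw [List.getD_eq_getElem?_getD, hget]; rfl
    have hdrop' : (hs.take 26).drop (i + 1) = rest' := by
      rw [← List.tail_drop, hdrop]
      simp
    rw [PySem.List.enumerate_cons, List.foldl_cons]
    have hcast : (i : Int) + 1 = ((i + 1 : Nat) : Int) := by push_cast; ring
    have htoNat : ((i : Int)).toNat = i := Int.toNat_natCast i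
    have hLt : (Char.ofNat (65 + i)).toNat = 65 + i := ofNat_letter_toNat i hi26
    rw [hcast, ih (i + 1) hdrop' _ ?_]
    · -- pointwise collapse of the extra pass
      rw [show stepFn pieces ((i : Int), h)
            = pieces.flatMap (pieceStep (Char.ofNat (65 + i)) ('[' :: (h.toList ++ [']'])))
          from by simp [stepFn, htoNat]]
      rw [List.flatMap_assoc]
      refine List.flatMap_congr ?_
      intro q hq
      by_cases hq1 : q.1
      · -- text piece: reassemble the split
        have hRL : subAChar hs (Char.ofNat (65 + i)) = '[' :: (h.toList ++ [']']) := by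
          unfold subAChar
          have hcond : 'A' ≤ Char.ofNat (65 + i) ∧ Char.ofNat (65 + i) ≤ 'Z' := by
            constructor
            · show 'A'.toNat ≤ (Char.ofNat (65 + i)).toNat
              rw [hLt]; show 65 ≤ 65 + i; omega
            · show (Char.ofNat (65 + i)).toNat ≤ 'Z'.toNat
              rw [hLt]; show 65 + i ≤ 90; omega
          rw [if_pos hcond]
          have h65 : 'A'.toNat = 65 := rfl
          rw [h65, hLt]
          rw [if_pos (by omega)]
          have : 65 + i - 65 = i := by omega
          rw [this, hgetd]
        rw [if_pos hq1]
        simp only [pieceStep, hq1, if_true, List.flatMap_cons, List.flatMap_assoc,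
          Bool.false_eq_true, if_false, List.flatMap_nil, List.append_nil]
        conv_rhs => rw [flatMap_spChar (Char.ofNat (65 + i)) (subAChar hs) q.2, hRL]
      · simp [pieceStep, hq1]
    · -- the invariant survives one pass
      intro q hq hq1 c hc
      rw [show stepFn pieces ((i : Int), h)
            = pieces.flatMap (pieceStep (Char.ofNat (65 + i)) ('[' :: (h.toList ++ [']'])))
          from by simp [stepFn, htoNat]] at hq
      rcases List.mem_flatMap.mp hq with ⟨q0, hq0, hmem⟩
      unfold pieceStep at hmem
      by_cases hq01 : q0.1
      · rw [if_pos hq01] at hmem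
        have hchars : ∀ x ∈ q.2, x ∈ q0.2 ∧ x ≠ Char.ofNat (65 + i) := by
          rcases List.mem_cons.mp hmem with hqe | hq2
          · intro x hx
            rw [hqe] at hx
            exact (spChar_chars (Char.ofNat (65 + i)) q0.2).1 x hx
          · rcases List.mem_flatMap.mp hq2 with ⟨part, hpart, hqin⟩
            rcases List.mem_cons.mp hqin with hqe | hqe
            · exfalso
              rw [hqe] at hq1
              exact Bool.noConfusion hq1
            · intro x hx
              rcases List.mem_cons.mp hqe with hqe' | hqe'
              · rw [hqe'] at hx
                exact (spChar_chars (Char.ofNat (65 + i)) q0.2).2 part hpart x hx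
              · exact absurd hqe' (List.not_mem_nil)
        have hcx := hchars c hc
        have hold := hInv q0 hq0 hq01 c hcx.1
        rcases hold with hl | hr
        · exact Or.inl hl
        · right
          rcases Nat.lt_or_ge c.toNat (65 + i + 1) with hlt' | hge'
          · exfalso
            have : c.toNat = 65 + i := by omega
            exact hcx.2 (char_eq_of_toNat c i hi26 this)
          · omega
      · rw [if_neg hq01] at hmem
        have hqq : q = q0 := by
          rcases List.mem_cons.mp hmem with hqe | hqe
          · exact hqe
          · exact absurd hqe (List.not_mem_nil)
        rw [hqq] at hq1
        exact absurd hq1 hq01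

-- ===== VERDICT (by name: the statement is the Claim_ definition above) =====
theorem substitute_hidden_spec : Claim_equal_substitute_hidden := by
  intro expr hs _
  unfold Spec_substitute_hidden substitute_hidden substitute_hidden_alt
  rw [PySem.List.foldl_append_eq_flatMap, portStep_eq, join_nil_sep, ← List.flatMap_def]
  have h0 := main_inv hs (hs.take 26) 0 rfl [(true, expr.toList)]
    (by intro q hq hq1 c hc; omega)
  rw [Nat.cast_zero] at h0
  rw [h0]
  simp
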